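-- pv_equiv track=rewrite | github.com/barryyan0121/leetcode-practice | python/3333.找到初始输入字符串 II.py | possibleStringCount
-- ===== SOURCE A (Python) =====
-- def possibleStringCount(word: str, k: int) -> int:
--     mod = 10**9 + 7
--     n, cnt = len(word), 1
--     freq = list()
--
--     for i in range(1, n):
--         if word[i] == word[i - 1]:
--             cnt += 1
--         else:
--             freq.append(cnt)
--             cnt = 1
--     freq.append(cnt)
--
--     ans = 1
--     for o in freq:
--         ans = ans * o % mod
--
--     if len(freq) >= k:
--         return ans
--
--     f, g = [1] + [0] * (k - 1), [1] * k
--     for i in range(len(freq)):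
--         f_new = [0] * k
--         for j in range(1, k):
--             f_new[j] = g[j - 1]
--             if j - freq[i] - 1 >= 0:
--                 f_new[j] = (f_new[j] - g[j - freq[i] - 1]) % mod
--         g_new = [f_new[0]] + [0] * (k - 1)
--         for j in range(1, k):
--             g_new[j] = (g_new[j - 1] + f_new[j]) % mod
--         f, g = f_new, g_new
--     return (ans - g[k - 1]) % mod
-- ===== SOURCE B (Python) =====
-- def possibleStringCount(word: str, k: int) -> int:
--     mod = 10**9 + 7
--
--     # run lengths of equal consecutive characters
--     freq = []
--     prev = None
--     for ch in word:
--         if freq and ch == prev: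
--             freq[-1] += 1
--         else:
--             freq.append(1)
--         prev = ch
--
--     ans = 1
--     for o in freq:
--         ans = ans * o % mod
--
--     if len(freq) >= k:
--         return ans
--
--     # dp[j] = number of ways to pick a positive length <= freq[i] from each
--     # group seen so far with total length exactly j (mod)
--     dp = [1] + [0] * (k - 1)
--     for f in freq:
--         new = [0] * k
--         for j in range(1, k):
--             s = 0
--             for t in range(1, min(f, j) + 1):
--                 s += dp[j - t]
--             new[j] = s % mod
--         dp = new
--     return (ans - sum(dp) % mod) % mod
-- ===== Notes on version B (the rewrite author's own statement) =====
-- stated objective: simpler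
-- what changed: The prefix-sum f/g sliding-window DP is replaced by a plain bounded-knapsack array dp[j] (ways with total length exactly j) filled with an explicit inner summation loop, the run-length grouping is rewritten as a direct scan that grows/increments the last run, and the final answer is (ans - sum(dp)) % mod.
-- intended difference: On the empty word with k = 1 A invents a phantom run of length 1 and returns 1, claiming one possible original of length >= 1, while B returns 0, the intended count since no non-empty original can type the empty string. — e.g. on possibleStringCount("", 1): A returns 1, B returns 0
import Mathlib
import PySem

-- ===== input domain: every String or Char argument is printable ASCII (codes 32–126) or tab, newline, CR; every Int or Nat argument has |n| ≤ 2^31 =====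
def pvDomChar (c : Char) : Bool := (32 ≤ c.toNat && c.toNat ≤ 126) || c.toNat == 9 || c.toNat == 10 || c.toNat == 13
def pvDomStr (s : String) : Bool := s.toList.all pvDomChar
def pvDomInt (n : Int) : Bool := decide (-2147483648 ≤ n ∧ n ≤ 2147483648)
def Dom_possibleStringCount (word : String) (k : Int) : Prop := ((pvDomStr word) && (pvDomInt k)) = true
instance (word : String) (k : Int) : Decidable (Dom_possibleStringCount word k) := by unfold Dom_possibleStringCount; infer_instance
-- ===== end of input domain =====

-- B replaces A's prefix-sum f/g DP by a naive bounded-knapsack dp of exact-length counts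
-- and builds the run lengths by a direct scan; objective: simpler. On ("", 1) A returns 1
-- (a phantom run) while B returns 0 (intended); see D_possibleStringCount below.

-- ===== PORT A =====
-- helper: the body of 'for i in range(1, n)' building (cnt, freq)
def pvA_groupStep (l : List Char) (st : Int × List Int) (i : Int) : Int × List Int :=
  if PySem.List.pyGetD l i ' ' = PySem.List.pyGetD l (i - 1) ' '
  then (st.1 + 1, st.2)
  else (1, st.2 ++ [st.1])

-- helper: one iteration of 'for i in range(len(freq))' — builds f_new then g_new by index loops
def pvA_dpStep (k : Int) (fg : List Int × List Int) (fi : Int) : List Int × List Int :=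
  let f_new : List Int := (PySem.List.pyRange 1 k 1).foldl (fun fn j =>
      let v := PySem.List.pyGetD fg.2 (j - 1) 0
      let v := if j - fi - 1 ≥ 0
               then PySem.Int.mod (v - PySem.List.pyGetD fg.2 (j - fi - 1) 0) 1000000007
               else v
      PySem.List.pySetD fn j v) (List.replicate k.toNat 0)
  let g_new : List Int := (PySem.List.pyRange 1 k 1).foldl (fun gn j =>
      PySem.List.pySetD gn j
        (PySem.Int.mod (PySem.List.pyGetD gn (j - 1) 0 + PySem.List.pyGetD f_new j 0) 1000000007))
    (PySem.List.pyGetD f_new 0 0 :: List.replicate (k - 1).toNat 0)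
  (f_new, g_new)

def possibleStringCount (word : String) (k : Int) : Int :=
  let l := word.toList
  let st := (PySem.List.pyRange 1 (l.length : Int) 1).foldl (pvA_groupStep l) (1, [])
  let freq : List Int := st.2 ++ [st.1]
  let ans := freq.foldl (fun a o => PySem.Int.mod (a * o) 1000000007) 1
  if (freq.length : Int) ≥ k then ans
  else
    let fg := (PySem.List.pyRange 0 (freq.length : Int) 1).foldl
        (fun fg i => pvA_dpStep k fg (PySem.List.pyGetD freq i 0))
        (1 :: List.replicate (k - 1).toNat 0, List.replicate k.toNat 1)
    PySem.Int.mod (ans - PySem.List.pyGetD fg.2 (k - 1) 0) 1000000007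

-- ===== PORT B =====
-- helper: run-length scan step — 'freq[-1] += 1' or 'freq.append(1)', remembering prev
def pvB_groupStep (st : List Int × Option Char) (ch : Char) : List Int × Option Char :=
  if st.1 ≠ [] ∧ some ch = st.2
  then (PySem.List.pySetD st.1 (-1) (PySem.List.pyGetD st.1 (-1) 0 + 1), some ch)
  else (st.1 ++ [1], some ch)

-- helper: one outer iteration of the bounded-knapsack: new[j] = sum of dp[j-t], t = 1..min(f, j)
def pvB_dpStep (k : Int) (dp : List Int) (f : Int) : List Int :=
  (PySem.List.pyRange 1 k 1).foldl (fun nw j =>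
      let s := (PySem.List.pyRange 1 (min f j + 1) 1).foldl
          (fun s t => s + PySem.List.pyGetD dp (j - t) 0) 0
      PySem.List.pySetD nw j (PySem.Int.mod s 1000000007)) (List.replicate k.toNat 0)

def possibleStringCount_alt (word : String) (k : Int) : Int :=
  let st := word.toList.foldl pvB_groupStep ([], none)
  let freq := st.1
  let ans := freq.foldl (fun a o => PySem.Int.mod (a * o) 1000000007) 1
  if (freq.length : Int) ≥ k then ans
  else
    let dp := freq.foldl (pvB_dpStep k) (1 :: List.replicate (k - 1).toNat 0)
    PySem.Int.mod (ans - PySem.Int.mod (dp.foldl (fun a x => a + x) 0) 1000000007) 1000000007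

-- ===== PRECONDITION & SPEC =====
-- On the empty word with k = 1, A invents a phantom run of length 1 and returns 1 (one
-- possible original of length ≥ 1), while B returns 0, the intended count: no non-empty
-- original can type the empty string.
def D_possibleStringCount (word : String) (k : Int) : Prop := word = "" ∧ k = 1
instance (word : String) (k : Int) : Decidable (D_possibleStringCount word k) := by
  unfold D_possibleStringCount; infer_instance
def Spec_possibleStringCount (word : String) (k : Int) (out : Int) : Prop :=
  ¬ D_possibleStringCount word k → out = possibleStringCount_alt word k
instance (word : String) (k : Int) (out : Int) : Decidable (Spec_possibleStringCount word k out) := by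
  unfold Spec_possibleStringCount; infer_instance
def pvDiffWitness_possibleStringCount : String × Int := ("", 1)
def pvDiffWitnessOut_possibleStringCount : Int × Int := (1, 0)

-- ===== CLAIM (what is proved, stated in full; the proofs are below) =====
def Claim_unchanged_possibleStringCount : Prop := ∀ (word : String) (k : Int), Dom_possibleStringCount word k → Spec_possibleStringCount word k (possibleStringCount word k)
def Claim_changed_possibleStringCount : Prop := Dom_possibleStringCount (pvDiffWitness_possibleStringCount.1) (pvDiffWitness_possibleStringCount.2) ∧ D_possibleStringCount (pvDiffWitness_possibleStringCount.1) (pvDiffWitness_possibleStringCount.2) ∧ possibleStringCount (pvDiffWitness_possibleStringCount.1) (pvDiffWitness_possibleStringCount.2) = pvDiffWitnessOut_possibleStringCount.1 ∧ possibleStringCount_alt (pvDiffWitness_possibleStringCount.1) (pvDiffWitness_possibleStringCount.2) = pvDiffWitnessOut_possibleStringCount.2 ∧ pvDiffWitnessOut_possibleStringCount.1 ≠ pvDiffWitnessOut_possibleStringCount.2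
def Claim_exact_possibleStringCount : Prop := ∀ (word : String) (k : Int), Dom_possibleStringCount word k → D_possibleStringCount word k → possibleStringCount word k ≠ possibleStringCount_alt word k

-- ===== LEMMAS AND PROOFS =====

-- run-length decomposition
def pvRunsGo (p : Char) (cnt : Int) : List Char → List Int
  | [] => [cnt]
  | c :: cs => if c = p then pvRunsGo p (cnt + 1) cs else cnt :: pvRunsGo c 1 cs

def pvRuns : List Char → List Int
  | [] => []
  | c :: cs => pvRunsGo c 1 cs

def pvLastD (d : Char) : List Char → Char
  | [] => d
  | c :: cs => pvLastD c cs

def pvAGo (p : Char) (cnt : Int) (acc : List Int) : List Char → Int × List Int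
  | [] => (cnt, acc)
  | c :: cs => if c = p then pvAGo p (cnt + 1) acc cs else pvAGo c 1 (acc ++ [cnt]) cs

theorem pvAGo_spec (rest : List Char) : ∀ (p : Char) (cnt : Int) (acc : List Int),
    (pvAGo p cnt acc rest).2 ++ [(pvAGo p cnt acc rest).1] = acc ++ pvRunsGo p cnt rest := by
  induction rest with
  | nil => intro p cnt acc; simp [pvAGo, pvRunsGo]
  | cons c cs ih =>
    intro p cnt acc
    by_cases h : c = p <;> simp [pvAGo, pvRunsGo, h, ih]

-- A's grouping loop computes pvAGo
theorem pvA_fold (rest : List Char) : ∀ (u : List Char) (p : Char) (cnt : Int) (acc : List Int),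
    ((PySem.List.pyRange ((u.length : Int) + 1) (((u ++ p :: rest).length : Int)) 1).foldl
      (pvA_groupStep (u ++ p :: rest)) (cnt, acc)) = pvAGo p cnt acc rest := by
  induction rest with
  | nil =>
    intro u p cnt acc
    rw [PySem.List.pyRange_one_eq_nil (by simp)]
    simp [pvAGo]
  | cons c cs ih =>
    intro u p cnt acc
    rw [PySem.List.pyRange_one_cons (by simp)]
    have h1 : ((u.length : Int) + 1) = ((u.length + 1 : Nat) : Int) := by push_cast; ring
    have h2 : ((u.length : Int) + 1 - 1) = ((u.length : Nat) : Int) := by omega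
    have e1 : PySem.List.pyGetD (u ++ p :: c :: cs) ((u.length : Int) + 1) ' ' = c := by
      rw [h1, PySem.List.pyGetD_natCast]
      simp [List.getD]
    have e2 : PySem.List.pyGetD (u ++ p :: c :: cs) ((u.length : Int) + 1 - 1) ' ' = p := by
      rw [h2, PySem.List.pyGetD_natCast]
      simp [List.getD]
    simp only [List.foldl_cons, pvA_groupStep, e1, e2]
    by_cases h : c = p
    · have := ih (u ++ [p]) c (cnt + 1) acc
      simp only [List.append_assoc, List.cons_append, List.nil_append, List.length_append,
        List.length_cons] at this ⊢
      rw [h] at this ⊢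
      simp only [pvAGo]
      rw [← this]
      norm_num
    · have := ih (u ++ [p]) c 1 (acc ++ [cnt])
      simp only [List.append_assoc, List.cons_append, List.nil_append, List.length_append,
        List.length_cons] at this ⊢
      simp only [pvAGo, if_neg h]
      rw [← this]
      norm_num

theorem pvSetD_last (acc : List Int) (cnt v : Int) :
    PySem.List.pySetD (acc ++ [cnt]) (-1) v = acc ++ [v] := by
  simp [PySem.List.pySetD, PySem.List.pySet?, PySem.List.pyIdx?]

theorem pvB_fold (rest : List Char) : ∀ (p : Char) (cnt : Int) (acc : List Int),
    (rest.foldl pvB_groupStep (acc ++ [cnt], some p))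
      = (acc ++ pvRunsGo p cnt rest, some (pvLastD p rest)) := by
  induction rest with
  | nil => intro p cnt acc; simp [pvRunsGo, pvLastD]
  | cons c cs ih =>
    intro p cnt acc
    simp only [List.foldl_cons, pvB_groupStep]
    by_cases h : c = p
    · subst h
      rw [if_pos (⟨by exact List.append_ne_nil_of_right_ne_nil acc (by exact List.cons_ne_nil cnt []), rfl⟩ : _ ∧ _), PySem.List.pyGetD_neg_one_append_singleton, pvSetD_last, ih]
      simp [pvRunsGo, pvLastD]
    · rw [if_neg (fun hc => h (Option.some.inj hc.2))]
      have := ih c 1 (acc ++ [cnt])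
      rw [this]
      simp [pvRunsGo, pvLastD, h, List.append_assoc]

-- write-only array-fill loop: 'for j in range(a, len): l[j] = F(j)'
theorem pvFill (F : Int → Int) : ∀ (n a len : Nat) (init : List Int), init.length = len → len - a = n →
    (PySem.List.pyRange (a : Int) (len : Int) 1).foldl
      (fun l j => PySem.List.pySetD l j (F j)) init
    = init.take a ++ ((List.range len).drop a).map (fun i : Nat => F (i : Int)) := by
  intro n
  induction n with
  | zero =>
    intro a len init hlen h
    rw [PySem.List.pyRange_one_eq_nil (by exact_mod_cast Nat.le_of_sub_eq_zero h)]
    have hd : (List.range len).drop a = [] :=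
      List.drop_eq_nil_of_le (by simpa using Nat.le_of_sub_eq_zero h)
    simp [hd, List.take_of_length_le, hlen, Nat.le_of_sub_eq_zero h]
  | succ n ih =>
    intro a len init hlen h
    have ha : a < len := by omega
    rw [PySem.List.pyRange_one_cons (by exact_mod_cast ha)]
    simp only [List.foldl_cons, PySem.List.pySetD_natCast]
    have hcast : ((a : Int) + 1) = ((a + 1 : Nat) : Int) := by push_cast; ring
    rw [hcast]
    rw [ih (a + 1) len (init.set a (F a)) (by simp [hlen]) (by omega)]
    have hdrop : (List.range len).drop a = a :: (List.range len).drop (a + 1) := by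
      rw [List.drop_eq_getElem_cons (by simpa using ha)]
      simp
    have htake : (init.set a (F a)).take (a + 1) = init.take a ++ [F a] := by
      rw [List.set_eq_take_append_cons_drop, if_pos (by omega)]
      rw [List.take_append]
      have h1 : (List.take a init).length = a := by simp; omega
      rw [h1]
      simp [List.take_take]
    rw [htake, hdrop]
    simp [List.append_assoc]

-- prefix-scan loop: 'for j in range(a, len): l[j] = step(l[j-1], j)'
theorem pvScan (step : Int → Int → Int) (G : Nat → Int) : ∀ (n a len : Nat) (init : List Int),
    init.length = len → len - a = n → 1 ≤ a →
    (∀ i : Nat, i < a → i < len → init.getD i 0 = G i) →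
    (∀ i : Nat, a ≤ i → i < len → G i = step (G (i - 1)) (i : Int)) →
    (PySem.List.pyRange (a : Int) (len : Int) 1).foldl
      (fun l j => PySem.List.pySetD l j (step (PySem.List.pyGetD l (j - 1) 0) j)) init
    = (List.range len).map G := by
  intro n
  induction n with
  | zero =>
    intro a len init hlen h _ hpre _
    rw [PySem.List.pyRange_one_eq_nil (by exact_mod_cast Nat.le_of_sub_eq_zero h)]
    simp only [List.foldl_nil]
    apply List.ext_getElem (by simp [hlen])
    intro i hi _
    simp only [List.getElem_map, List.getElem_range]
    have := hpre i (by omega) (by omega)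
    rwa [List.getD_eq_getElem init 0 hi] at this
  | succ n ih =>
    intro a len init hlen h ha1 hpre hG
    have ha : a < len := by omega
    rw [PySem.List.pyRange_one_cons (by exact_mod_cast ha)]
    simp only [List.foldl_cons]
    have hread : PySem.List.pyGetD init ((a : Int) - 1) 0 = G (a - 1) := by
      have hc : ((a : Int) - 1) = ((a - 1 : Nat) : Int) := by omega
      rw [hc, PySem.List.pyGetD_natCast]
      exact hpre (a - 1) (by omega) (by omega)
    rw [hread, PySem.List.pySetD_natCast]
    have hval : step (G (a - 1)) (a : Int) = G a := (hG a le_rfl ha).symm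
    rw [hval]
    have hcast : ((a : Int) + 1) = ((a + 1 : Nat) : Int) := by push_cast; ring
    rw [hcast]
    rw [ih (a + 1) len (init.set a (G a)) (by simp [hlen]) (by omega) (by omega)
      (by
        intro i hi hilen
        rcases Nat.lt_or_ge i a with hlt | hge
        · rw [List.getD_eq_getElem _ 0 (by simp [hlen]; omega), List.getElem_set_ne (by omega)]
          have := hpre i (by omega) hilen
          rwa [List.getD_eq_getElem init 0 (by omega)] at this
        · have hia : i = a := by omega
          subst hia
          rw [List.getD_eq_getElem _ 0 (by simp [hlen]; omega), List.getElem_set_self (by simp [hlen]; omega)])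
      (by
        intro i hi hilen
        exact hG i (by omega) hilen)]

def pvS (dp : List Int) (i : Nat) : Int := ∑ t ∈ Finset.range i, dp.getD t 0

def pvFB (dp : List Int) (f j : Int) : Int :=
  PySem.Int.mod ((PySem.List.pyRange 1 (min f j + 1) 1).foldl
    (fun s t => s + PySem.List.pyGetD dp (j - t) 0) 0) 1000000007

def pvFA (g : List Int) (f j : Int) : Int :=
  let v := PySem.List.pyGetD g (j - 1) 0
  if j - f - 1 ≥ 0
  then PySem.Int.mod (v - PySem.List.pyGetD g (j - f - 1) 0) 1000000007
  else v

def pvDpNext (dp : List Int) (f : Int) (kn : Nat) : List Int :=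
  (List.range kn).map (fun i : Nat => if i = 0 then 0 else pvFB dp f (i : Int))

def pvGof (dp : List Int) (kn : Nat) : List Int :=
  (List.range kn).map (fun i => PySem.Int.mod (pvS dp (i + 1)) 1000000007)

theorem pvSum_list (n : Nat) (h : Nat → Int) :
    ((List.range n).map h).sum = ∑ i ∈ Finset.range n, h i := rfl

-- the window value of B's inner sum
theorem pvFB_window (dp : List Int) (f : Int) (hf : 1 ≤ f) (j : Nat) (hj1 : 1 ≤ j) :
    pvFB dp f (j : Int) =
      PySem.Int.mod (pvS dp j - pvS dp (j - min f.toNat j)) 1000000007 := by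
  unfold pvFB
  rw [PySem.List.foldl_add]
  have hmin : (min f (j : Int) + 1 - 1).toNat = min f.toNat j := by omega
  rw [PySem.List.pyRange_one, List.map_map]
  have hcongr : ∀ x ∈ List.range (min f (j:Int) + 1 - 1).toNat,
      ((fun t => PySem.List.pyGetD dp ((j:Int) - t) 0) ∘ (fun k : Nat => 1 + (k : Int))) x
      = dp.getD (j - 1 - x) 0 := by
    intro x hx
    simp only [List.mem_range] at hx
    simp only [Function.comp_apply]
    have : ((j:Int) - (1 + (x:Int))) = ((j - 1 - x : Nat) : Int) := by omega
    rw [this, PySem.List.pyGetD_natCast]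
  rw [List.map_congr_left hcongr, hmin]
  rw [pvSum_list]
  have hreflect : ∑ x ∈ Finset.range (min f.toNat j), dp.getD (j - 1 - x) 0
      = ∑ x ∈ Finset.range (min f.toNat j), dp.getD (j - min f.toNat j + x) 0 := by
    rw [← Finset.sum_range_reflect]
    apply Finset.sum_congr rfl
    intro x hx
    simp only [Finset.mem_range] at hx
    congr 1
    omega
  rw [hreflect]
  have hico : ∑ x ∈ Finset.range (min f.toNat j), dp.getD (j - min f.toNat j + x) 0
      = pvS dp j - pvS dp (j - min f.toNat j) := by
    unfold pvS
    have key := Finset.sum_range_add (fun t => dp.getD t 0) (j - min f.toNat j) (min f.toNat j)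
    have hj2 : j - min f.toNat j + min f.toNat j = j := by omega
    rw [hj2] at key
    linarith [key]
  rw [hico]
  simp

theorem pvGof_getD (dp : List Int) (kn i : Nat) (hi : i < kn) :
    (pvGof dp kn).getD i 0 = PySem.Int.mod (pvS dp (i + 1)) 1000000007 := by
  unfold pvGof
  rw [List.getD_eq_getElem _ 0 (by simpa using hi)]
  simp

theorem pvFA_eq_pvFB (kn : Nat) (dp : List Int) (f : Int) (hf : 1 ≤ f)
    (j : Nat) (hj1 : 1 ≤ j) (hj : j < kn) :
    pvFA (pvGof dp kn) f (j : Int) = pvFB dp f (j : Int) := by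
  rw [pvFB_window dp f hf j hj1]
  unfold pvFA
  have hc1 : ((j : Int) - 1) = ((j - 1 : Nat) : Int) := by omega
  rw [hc1, PySem.List.pyGetD_natCast, pvGof_getD dp kn (j - 1) (by omega)]
  have hone : j - 1 + 1 = j := by omega
  rw [hone]
  by_cases hcase : (j : Int) - f - 1 ≥ 0
  · rw [if_pos hcase]
    have hmin : min f.toNat j = f.toNat := by omega
    have hc2 : ((j : Int) - f - 1) = ((j - 1 - f.toNat : Nat) : Int) := by omega
    rw [hc2, PySem.List.pyGetD_natCast, pvGof_getD dp kn (j - 1 - f.toNat) (by omega)]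
    have hc3 : j - 1 - f.toNat + 1 = j - f.toNat := by omega
    rw [hc3, hmin]
    have hm : (0 : Int) < 1000000007 := by norm_num
    rw [PySem.Int.mod_eq_emod_of_pos hm, PySem.Int.mod_eq_emod_of_pos hm,
      PySem.Int.mod_eq_emod_of_pos hm, PySem.Int.mod_eq_emod_of_pos hm]
    rw [← Int.sub_emod]
  · rw [if_neg hcase]
    have hmin : min f.toNat j = j := by omega
    rw [hmin]
    simp [pvS]

theorem pvHeadForm (kn : Nat) (x0 : Int) (F : Int → Int) :
    (x0 :: ((List.range (kn + 1)).drop 1).map (fun i : Nat => F (i : Int)))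
      = (List.range (kn + 1)).map (fun i : Nat => if i = 0 then x0 else F (i : Int)) := by
  rw [List.range_succ_eq_map]
  simp [List.map_map, Function.comp_def]

-- B's inner loop produces pvDpNext
theorem pvB_dpStep_eq (kn : Nat) (hk : 1 ≤ kn) (dp : List Int) (f : Int) :
    pvB_dpStep (kn : Int) dp f = pvDpNext dp f kn := by
  have h1 : pvB_dpStep (kn : Int) dp f
      = (List.replicate kn (0:Int)).take 1
        ++ ((List.range kn).drop 1).map (fun i : Nat => pvFB dp f (i : Int)) := by
    have htn : ((kn : Int)).toNat = kn := by omega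
    unfold pvB_dpStep
    rw [htn]
    exact pvFill (fun j => pvFB dp f j) (kn - 1) 1 kn (List.replicate kn 0) (by simp) (by omega)
  rw [h1]
  obtain ⟨m, rfl⟩ : ∃ m, kn = m + 1 := ⟨kn - 1, by omega⟩
  rw [show (List.replicate (m + 1) (0 : Int)).take 1 = [0] by simp [List.replicate_succ]]
  unfold pvDpNext
  rw [show ([0] ++ ((List.range (m+1)).drop 1).map (fun i : Nat => pvFB dp f (i : Int)))
      = (0 :: ((List.range (m+1)).drop 1).map (fun i : Nat => pvFB dp f (i : Int))) from rfl]
  exact pvHeadForm m 0 (fun j => pvFB dp f j)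

theorem pvDpNext_getD (dp : List Int) (f : Int) (kn i : Nat) (hi : i < kn) :
    (pvDpNext dp f kn).getD i 0 = if i = 0 then 0 else pvFB dp f (i : Int) := by
  unfold pvDpNext
  rw [List.getD_eq_getElem _ 0 (by simpa using hi)]
  simp

theorem pvModAdd (a b : Int) :
    PySem.Int.mod (PySem.Int.mod a 1000000007 + b) 1000000007
      = PySem.Int.mod (a + b) 1000000007 := by
  have hm : (0 : Int) < 1000000007 := by norm_num
  rw [PySem.Int.mod_eq_emod_of_pos hm, PySem.Int.mod_eq_emod_of_pos hm,
    PySem.Int.mod_eq_emod_of_pos hm]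
  rw [Int.add_emod, Int.emod_emod_of_dvd _ (dvd_refl _), ← Int.add_emod]

theorem pvA_dpStep_eq (kn : Nat) (hk : 1 ≤ kn) (dp : List Int) (f : Int) (hf : 1 ≤ f)
    (fprev : List Int) :
    pvA_dpStep (kn : Int) (fprev, pvGof dp kn) f
      = (pvDpNext dp f kn, pvGof (pvDpNext dp f kn) kn) := by
  have htn : ((kn : Int)).toNat = kn := by omega
  have htn1 : ((kn : Int) - 1).toNat = kn - 1 := by omega
  have hfnew : (PySem.List.pyRange 1 (kn : Int) 1).foldl (fun fn j =>
      let v := PySem.List.pyGetD (pvGof dp kn) (j - 1) 0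
      let v := if j - f - 1 ≥ 0
               then PySem.Int.mod (v - PySem.List.pyGetD (pvGof dp kn) (j - f - 1) 0) 1000000007
               else v
      PySem.List.pySetD fn j v) (List.replicate kn 0) = pvDpNext dp f kn := by
    have h1 : (PySem.List.pyRange 1 (kn : Int) 1).foldl (fun fn j =>
        PySem.List.pySetD fn j (pvFA (pvGof dp kn) f j)) (List.replicate kn 0)
        = (List.replicate kn (0:Int)).take 1
          ++ ((List.range kn).drop 1).map (fun i : Nat => pvFA (pvGof dp kn) f (i : Int)) :=
      pvFill (fun j => pvFA (pvGof dp kn) f j) (kn - 1) 1 kn (List.replicate kn 0) (by simp) (by omega)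
    rw [show (fun fn (j : Int) =>
        let v := PySem.List.pyGetD (pvGof dp kn) (j - 1) 0
        let v := if j - f - 1 ≥ 0
                 then PySem.Int.mod (v - PySem.List.pyGetD (pvGof dp kn) (j - f - 1) 0) 1000000007
                 else v
        PySem.List.pySetD fn j v)
      = (fun fn (j : Int) => PySem.List.pySetD fn j (pvFA (pvGof dp kn) f j)) from rfl]
    rw [h1]
    obtain ⟨m, rfl⟩ : ∃ m, kn = m + 1 := ⟨kn - 1, by omega⟩
    rw [show (List.replicate (m + 1) (0 : Int)).take 1 = [0] by simp [List.replicate_succ]]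
    rw [show ([0] ++ ((List.range (m+1)).drop 1).map (fun i : Nat => pvFA (pvGof dp (m+1)) f (i : Int)))
        = (0 :: ((List.range (m+1)).drop 1).map (fun i : Nat => pvFA (pvGof dp (m+1)) f (i : Int))) from rfl]
    rw [pvHeadForm m 0 (fun j => pvFA (pvGof dp (m+1)) f j)]
    unfold pvDpNext
    apply List.map_congr_left
    intro i hi
    simp only [List.mem_range] at hi
    by_cases h0 : i = 0
    · simp [h0]
    · simp only [if_neg h0]
      exact pvFA_eq_pvFB (m + 1) dp f hf i (by omega) hi
  unfold pvA_dpStep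
  simp only [hfnew, htn, htn1]
  refine Prod.ext rfl ?_
  simp only []
  have hgd0 : PySem.List.pyGetD (pvDpNext dp f kn) 0 0 = 0 := by
    rw [PySem.List.pyGetD_zero, pvDpNext_getD dp f kn 0 (by omega)]
    simp
  rw [hgd0]
  have := pvScan (fun x j => PySem.Int.mod (x + PySem.List.pyGetD (pvDpNext dp f kn) j 0) 1000000007)
      (fun i => PySem.Int.mod (pvS (pvDpNext dp f kn) (i + 1)) 1000000007)
      (kn - 1) 1 kn ((0 : Int) :: List.replicate (kn - 1) 0) (by simp; omega) (by omega) (by omega)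
      (by
        intro i hi _
        have h0 : i = 0 := by omega
        subst h0
        show (0 : Int) = PySem.Int.mod (pvS (pvDpNext dp f kn) (0 + 1)) 1000000007
        rw [show pvS (pvDpNext dp f kn) (0 + 1) = (pvDpNext dp f kn).getD 0 0 by simp [pvS]]
        rw [pvDpNext_getD dp f kn 0 (by omega)]
        norm_num [PySem.Int.mod])
      (by
        intro i hi hilen
        simp only []
        have hc : ((i : Nat) : Int) = (i : Int) := rfl
        rw [PySem.List.pyGetD_natCast]
        have hsucc : pvS (pvDpNext dp f kn) (i + 1)
            = pvS (pvDpNext dp f kn) i + (pvDpNext dp f kn).getD i 0 := by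
          unfold pvS
          rw [Finset.sum_range_succ]
        rw [hsucc]
        have hi1 : i - 1 + 1 = i := by omega
        rw [hi1, pvModAdd])
  exact this

theorem pvOuter (kn : Nat) (hk : 1 ≤ kn) : ∀ (freq : List Int), (∀ x ∈ freq, 1 ≤ x) →
    ∀ (fprev dp : List Int),
    (freq.foldl (pvA_dpStep (kn : Int)) (fprev, pvGof dp kn)).2
      = pvGof (freq.foldl (pvB_dpStep (kn : Int)) dp) kn := by
  intro freq
  induction freq with
  | nil => intro _ fprev dp; rfl
  | cons f fs ih =>
    intro hpos fprev dp
    simp only [List.foldl_cons]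
    rw [pvA_dpStep_eq kn hk dp f (hpos f (by simp)) fprev,
      pvB_dpStep_eq kn hk dp f]
    exact ih (fun x hx => hpos x (by simp [hx])) _ _

theorem pvB_dpStep_fold_length (kn : Nat) (hk : 1 ≤ kn) : ∀ (freq : List Int) (dp : List Int),
    dp.length = kn → (freq.foldl (pvB_dpStep (kn : Int)) dp).length = kn := by
  intro freq
  induction freq with
  | nil => intro dp h; exact h
  | cons f fs ih =>
    intro dp h
    simp only [List.foldl_cons]
    rw [pvB_dpStep_eq kn hk dp f]
    exact ih _ (by simp [pvDpNext])

theorem pvGetD_replicate (m t : Nat) : (List.replicate m (0 : Int)).getD t 0 = 0 := by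
  rcases Nat.lt_or_ge t m with h | h
  · rw [List.getD_eq_getElem _ 0 (by simpa using h)]; simp
  · rw [List.getD_eq_default _ 0 (by simpa using h)]

theorem pvS_dp0 (m : Nat) : ∀ n : Nat, pvS (1 :: List.replicate m 0) n = if n = 0 then 0 else 1 := by
  intro n
  induction n with
  | zero => simp [pvS]
  | succ n ihn =>
    unfold pvS at ihn ⊢
    rw [Finset.sum_range_succ, ihn]
    rcases Nat.eq_zero_or_pos n with h | h
    · subst h; simp
    · rw [if_neg (by omega), if_neg (by omega)]
      have : ((1 : Int) :: List.replicate m 0).getD n 0 = 0 := by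
        cases n with
        | zero => omega
        | succ i => exact (List.getD_cons_succ ..).trans (pvGetD_replicate m i)
      rw [this]
      ring

theorem pvGof_dp0 (kn m : Nat) : pvGof (1 :: List.replicate m 0) kn = List.replicate kn 1 := by
  unfold pvGof
  apply List.ext_getElem (by simp)
  intro i h1 h2
  simp only [List.getElem_map, List.getElem_range, List.getElem_replicate]
  rw [pvS_dp0 m (i + 1), if_neg (by omega)]
  decide

theorem pvS_sum : ∀ (dp : List Int), pvS dp dp.length = dp.sum := by
  intro dp
  induction dp with
  | nil => simp [pvS]
  | cons c tl ih =>
    unfold pvS at ih ⊢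
    simp only [List.length_cons]
    rw [Finset.sum_range_succ']
    simp only [List.getD_cons_succ, List.getD_cons_zero]
    rw [ih]
    simp [List.sum_cons]
    ring

theorem pvFoldl_sum (dp : List Int) : dp.foldl (fun a x => a + x) 0 = dp.sum := by
  rw [PySem.List.foldl_add dp (fun x => x) 0]
  simp

theorem pvRunsGo_ne_nil (rest : List Char) : ∀ p cnt, pvRunsGo p cnt rest ≠ [] := by
  induction rest with
  | nil => intro p cnt; simp [pvRunsGo]
  | cons c cs ih =>
    intro p cnt
    unfold pvRunsGo
    by_cases h : c = p
    · simpa [h] using ih p (cnt + 1)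
    · simp [h]

theorem pvRunsGo_pos (rest : List Char) : ∀ p cnt, 1 ≤ cnt →
    ∀ x ∈ pvRunsGo p cnt rest, 1 ≤ x := by
  induction rest with
  | nil => intro p cnt hc x hx; simp [pvRunsGo] at hx; omega
  | cons c cs ih =>
    intro p cnt hc x hx
    unfold pvRunsGo at hx
    by_cases h : c = p
    · rw [if_pos h] at hx
      exact ih p (cnt + 1) (by omega) x hx
    · rw [if_neg h] at hx
      rcases List.mem_cons.mp hx with h1 | h1
      · omega
      · exact ih c 1 (by omega) x h1

theorem pvModOne : PySem.Int.mod 1 1000000007 = 1 := by decide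
theorem pvModZero : PySem.Int.mod 0 1000000007 = 0 := by decide

-- A's DP value for word = "" and k ≥ 2: total weight of the phantom run distribution
theorem pvEmptyA (kn : Nat) (hk : 2 ≤ kn) :
    pvS (pvDpNext (1 :: List.replicate (kn - 1) 0) 1 kn) kn = 1 := by
  unfold pvS
  have hpt : ∀ t ∈ Finset.range kn,
      (pvDpNext (1 :: List.replicate (kn - 1) 0) 1 kn).getD t 0
        = (if t = 1 then 1 else 0) := by
    intro t ht
    simp only [Finset.mem_range] at ht
    rw [pvDpNext_getD _ _ kn t ht]
    by_cases h0 : t = 0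
    · simp [h0]
    · rw [if_neg h0]
      rw [pvFB_window _ 1 le_rfl t (by omega)]
      have hmin : min (1 : Int).toNat t = 1 := by omega
      rw [hmin]
      rw [pvS_dp0 (kn - 1) t, pvS_dp0 (kn - 1) (t - 1)]
      by_cases h1 : t = 1
      · simp [h1]
      · rw [if_neg h0, if_neg (by omega), if_neg h1]
        rw [show (1 : Int) - 1 = 0 by norm_num, pvModZero]
  rw [Finset.sum_congr rfl hpt]
  rw [Finset.sum_ite_eq' (Finset.range kn) 1 (fun _ => (1 : Int))]
  rw [if_pos (by simp; omega)]

theorem pvEq (word : String) (k : Int) (hD : ¬ (word = "" ∧ k = 1)) :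
    possibleStringCount word k = possibleStringCount_alt word k := by
  simp only [possibleStringCount, possibleStringCount_alt]
  cases hl : word.toList with
  | nil =>
    have hw : word = "" := String.toList_eq_nil_iff.mp hl
    rw [PySem.List.pyRange_one_eq_nil (by simp)]
    simp only [List.foldl_nil, List.nil_append, List.length_cons, List.length_nil]
    rcases Int.lt_or_le 1 k with hk | hk
    · -- k ≥ 2: A runs its DP on the phantom run [1]; B's dp stays at the base row
      have hk2 : 2 ≤ k := by omega
      rw [if_neg (by push_cast; omega), if_neg (by push_cast; omega)]
      have hkk : k = ((k.toNat : Nat) : Int) := by omega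
      set kn := k.toNat with hkn
      have hknn : 2 ≤ kn := by omega
      rw [hkk]
      have ht2 : (((kn : Nat) : Int) - 1).toNat = kn - 1 := by omega
      rw [ht2]
      rw [show (List.replicate kn (1 : Int))
          = pvGof (1 :: List.replicate (kn - 1) 0) kn by rw [pvGof_dp0]]
      rw [show ((0 + 1 : Nat) : Int) = (([(1 : Int)] : List Int).length : Int) from rfl]
      rw [PySem.List.foldl_pyRange_zero_pyGetD' [(1 : Int)] 0 (pvA_dpStep (kn : Int))]
      simp only [List.foldl_cons, List.foldl_nil]
      rw [pvA_dpStep_eq kn (by omega) (1 :: List.replicate (kn - 1) 0) 1 le_rfl]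
      have hread : PySem.List.pyGetD
          (pvGof (pvDpNext (1 :: List.replicate (kn - 1) 0) 1 kn) kn) ((kn : Int) - 1) 0 = 1 := by
        rw [show ((kn : Int) - 1) = ((kn - 1 : Nat) : Int) by omega, PySem.List.pyGetD_natCast,
          pvGof_getD _ kn (kn - 1) (by omega), show kn - 1 + 1 = kn by omega,
          pvEmptyA kn hknn, pvModOne]
      rw [hread]
      have hsum : (List.replicate (kn - 1) (0 : Int)).foldl (fun a x => a + x) (0 + 1) = 1 := by
        rw [PySem.List.foldl_add (List.replicate (kn - 1) (0 : Int)) (fun x => x) (0 + 1)]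
        simp
      rw [hsum, pvModOne]
      norm_num
    · -- k ≤ 0 (k = 1 is inside D_): both sides return ans = 1
      have hk0 : k ≤ 0 := by
        rcases Int.lt_or_le k 1 with h | h
        · omega
        · exact absurd ⟨hw, by omega⟩ hD
      rw [if_pos (by push_cast; omega), if_pos (by push_cast; omega)]
      simp
  | cons c cs =>
    -- both grouping loops produce the run lengths pvRunsGo c 1 cs
    have hA := pvA_fold cs [] c 1 []
    simp only [List.nil_append, List.length_nil, Nat.cast_zero, zero_add] at hA
    have hAGo := pvAGo_spec cs c 1 []
    simp only [List.nil_append] at hAGo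
    have hB : ((c :: cs).foldl pvB_groupStep ([], none)).1 = pvRunsGo c 1 cs := by
      simp only [List.foldl_cons]
      rw [show pvB_groupStep ([], none) c = (([] : List Int) ++ [1], some c) by
        simp [pvB_groupStep]]
      rw [pvB_fold cs c 1 []]
      simp
    rw [hA, hB]
    rw [show (pvAGo c 1 [] cs).2 ++ [(pvAGo c 1 [] cs).1] = pvRunsGo c 1 cs from hAGo]
    set freq : List Int := pvRunsGo c 1 cs with hfreq
    have hfne : freq ≠ [] := pvRunsGo_ne_nil cs c 1
    have hpos : ∀ x ∈ freq, 1 ≤ x := pvRunsGo_pos cs c 1 le_rfl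
    by_cases hbr : (freq.length : Int) ≥ k
    · rw [if_pos hbr, if_pos hbr]
    · rw [if_neg hbr, if_neg hbr]
      have hlen1 : 1 ≤ freq.length := List.length_pos_of_ne_nil hfne
      have hk2 : 2 ≤ k := by
        omega
      have hkk : k = ((k.toNat : Nat) : Int) := by omega
      set kn := k.toNat with hkn
      have hknn : 2 ≤ kn := by omega
      rw [hkk]
      have ht2 : (((kn : Nat) : Int) - 1).toNat = kn - 1 := by omega
      rw [ht2]
      rw [show (List.replicate kn (1 : Int))
          = pvGof (1 :: List.replicate (kn - 1) 0) kn by rw [pvGof_dp0]]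
      rw [PySem.List.foldl_pyRange_zero_pyGetD' freq 0 (pvA_dpStep (kn : Int))]
      rw [pvOuter kn (by omega) freq hpos (1 :: List.replicate (kn - 1) 0)
        (1 :: List.replicate (kn - 1) 0)]
      set dp' : List Int := freq.foldl (pvB_dpStep (kn : Int)) (1 :: List.replicate (kn - 1) 0)
        with hdp'
      have hdlen : dp'.length = kn :=
        pvB_dpStep_fold_length kn (by omega) freq _ (by simp; omega)
      have hread : PySem.List.pyGetD (pvGof dp' kn) ((kn : Int) - 1) 0
          = PySem.Int.mod (dp'.foldl (fun a x => a + x) 0) 1000000007 := by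
        rw [show ((kn : Int) - 1) = ((kn - 1 : Nat) : Int) by omega, PySem.List.pyGetD_natCast,
          pvGof_getD _ kn (kn - 1) (by omega), show kn - 1 + 1 = kn by omega]
        rw [pvFoldl_sum, ← hdlen, pvS_sum]
      rw [hread]

-- ===== VERDICT (by name: the statement is the Claim_ definition above) =====
theorem possibleStringCount_spec : Claim_unchanged_possibleStringCount := by
  intro word k _ hD
  exact pvEq word k hD

theorem possibleStringCount_changed : Claim_changed_possibleStringCount := by
  unfold Claim_changed_possibleStringCount; decide

theorem possibleStringCount_tight : Claim_exact_possibleStringCount := by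
  intro word k _ hD
  obtain ⟨hw, hk⟩ := hD
  subst hw; subst hk
  decide
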